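-- pv_equiv track=rewrite | github.com/CNife/leetcode-python | code/diving_board_lcci.py | diving_board
-- ===== SOURCE A (Python) =====
-- from typing import List
--
-- def diving_board(shorter: int, longer: int, k: int) -> List[int]:
--     if k == 0:
--         return []
--     if shorter == longer:
--         return [shorter * k]
--
--     diff = longer - shorter
--     acc = shorter * k
--     result = [acc]
--     for _ in range(k):
--         acc += diff
--         result.append(acc)
--     return result
-- ===== SOURCE B (Python) =====
-- from typing import List
--
-- def diving_board(shorter: int, longer: int, k: int) -> List[int]:
--     if k == 0:
--         return []
--     if shorter == longer:
--         return [shorter * k]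
--     return [shorter * (k - i) + longer * i for i in range(k + 1)]
-- ===== Notes on version B (the rewrite author's own statement) =====
-- stated objective: simpler
-- what changed: The general case drops the running accumulator loop and computes each of the k+1 board lengths directly from its index by the closed form shorter*(k-i)+longer*i.
-- outside the precondition, e.g. on diving_board(1, 2, -1): A returns [-1], B returns []
import Mathlib
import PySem

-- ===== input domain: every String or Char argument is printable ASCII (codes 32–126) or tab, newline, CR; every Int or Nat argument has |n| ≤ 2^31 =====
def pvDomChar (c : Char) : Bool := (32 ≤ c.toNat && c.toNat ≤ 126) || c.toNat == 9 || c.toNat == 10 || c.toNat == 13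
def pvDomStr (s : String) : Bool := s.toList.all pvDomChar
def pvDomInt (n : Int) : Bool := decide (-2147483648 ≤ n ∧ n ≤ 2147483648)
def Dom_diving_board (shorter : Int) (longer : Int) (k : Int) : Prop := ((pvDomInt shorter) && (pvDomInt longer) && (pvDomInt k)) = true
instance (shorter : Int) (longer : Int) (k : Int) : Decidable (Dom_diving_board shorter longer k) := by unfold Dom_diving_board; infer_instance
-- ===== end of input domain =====

-- B replaces the accumulator loop of the general case by a direct closed-form
-- expression per index (simpler decomposition, same cost). Pre_ restricts to the
-- natural domain k ≥ 0 (a plank count); for negative k A's single-element result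
-- is an artefact of the empty range loop, while B returns the empty list.


-- ===== PORT A =====
def diving_board (shorter : Int) (longer : Int) (k : Int) : List Int :=
  if k == 0 then []
  else if shorter == longer then [shorter * k]
  else
    let diff := longer - shorter
    let acc := shorter * k
    let st := (PySem.List.pyRange 0 k 1).foldl
      (fun (s : Int × List Int) (_ : Int) => (s.1 + diff, s.2 ++ [s.1 + diff]))
      (acc, [acc])
    st.2

-- ===== PORT B =====
def diving_board_alt (shorter : Int) (longer : Int) (k : Int) : List Int :=
  if k == 0 then []
  else if shorter == longer then [shorter * k]
  else (PySem.List.pyRange 0 (k + 1) 1).map (fun i => shorter * (k - i) + longer * i)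

-- ===== PRECONDITION & SPEC =====
-- Pre_ excludes negative k (outside the natural domain of a plank count); there A
-- still returns its loop-free single-element list while B returns [].
def Pre_diving_board (shorter : Int) (longer : Int) (k : Int) : Prop := 0 ≤ k
instance (shorter : Int) (longer : Int) (k : Int) : Decidable (Pre_diving_board shorter longer k) := by unfold Pre_diving_board; infer_instance
def pvWitness_diving_board : Int × Int × Int := (1, 2, 3)

def Spec_diving_board (shorter : Int) (longer : Int) (k : Int) (out : List Int) : Prop := out = diving_board_alt shorter longer k
instance (shorter : Int) (longer : Int) (k : Int) (out : List Int) : Decidable (Spec_diving_board shorter longer k out) := by unfold Spec_diving_board; infer_instance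

-- ===== CLAIM (what is proved, stated in full; the proofs are below) =====
def Claim_equal_diving_board : Prop := ∀ (shorter : Int) (longer : Int) (k : Int), Dom_diving_board shorter longer k → Pre_diving_board shorter longer k → Spec_diving_board shorter longer k (diving_board shorter longer k)

-- ===== LEMMAS AND PROOFS =====
-- A's loop ignores the list elements: its result list is the initial list followed
-- by acc + (j+1)*diff for j ranging over the number of iterations.
theorem pvFoldA (diff : Int) : ∀ (l : List Int) (acc : Int) (res : List Int),
    (l.foldl (fun (s : Int × List Int) (_ : Int) => (s.1 + diff, s.2 ++ [s.1 + diff]))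
      (acc, res)).2
    = res ++ (List.range l.length).map (fun (j : Nat) => acc + ((j : Int) + 1) * diff) := by
  intro l
  induction l with
  | nil => intro acc res; simp
  | cons x t ih =>
    intro acc res
    rw [List.foldl_cons, ih, List.length_cons, List.range_succ_eq_map,
      List.map_cons, List.map_map, List.append_assoc, List.singleton_append]
    congr 2
    · push_cast; ring
    · apply List.map_congr_left
      intro j _
      simp only [Function.comp]
      push_cast
      ring

theorem diving_board_spec : Claim_equal_diving_board := by
  intro shorter longer k _ hk
  replace hk : 0 ≤ k := hk
  unfold Spec_diving_board diving_board diving_board_alt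
  by_cases h0 : k = 0
  · simp [h0]
  · by_cases hsl : shorter = longer
    · simp [h0, hsl]
    · simp only [beq_iff_eq, h0, hsl, if_false]
      rw [PySem.List.pyRange_one, PySem.List.pyRange_one, pvFoldA, List.map_map]
      have hlen : ((k : Int) - 0).toNat = k.toNat := by omega
      have hlen1 : ((k + 1 : Int) - 0).toNat = k.toNat + 1 := by omega
      rw [List.length_map, List.length_range, hlen, hlen1,
        List.range_succ_eq_map, List.map_cons, List.map_map, List.singleton_append]
      congr 1
      · simp only [Function.comp]; push_cast; ring
      · apply List.map_congr_left
        intro j _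
        simp only [Function.comp]
        push_cast
        ring
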